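-- pv_equiv track=rewrite | github.com/chiralcentre/Kattis | evenodd.py | F
-- ===== SOURCE A (Python) =====
-- MOD = 1000000007
--
-- memo = {}
--
-- def F(X):
--     if X <= 1: return 0
--     if X in memo: return memo[X]
--     #split into odd and even parts
--     #if X is even, odd part is even as well
--     odd = (X+1)//2
--     even = X//2
--     result = (even + 2*odd - 2 + F(odd) + F(even))%MOD
--     memo[X] = result
--     return result
-- ===== SOURCE B (Python) =====
-- MOD = 1000000007
--
-- memo = {}
--
-- def F(X):
--     # Bottom-up over the O(log X) chain of halved values instead of memoized
--     # recursion: at each depth the recursion only ever needs F at two adjacent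
--     # values (lo, hi) with hi - lo <= 1, so a pair of accumulators suffices.
--     if X <= 1:
--         return 0
--     levels = []
--     lo = hi = X
--     while hi > 1:
--         levels.append((lo, hi))
--         lo, hi = lo // 2, (hi + 1) // 2
--     flo = fhi = 0  # F(lo) = F(hi) = 0 for the deepest (all <= 1) level
--     for lo, hi in reversed(levels):
--         nlo = lo // 2
--         nflo = _val(lo, nlo, flo, fhi)
--         nfhi = nflo if hi == lo else _val(hi, nlo, flo, fhi)
--         flo, fhi = nflo, nfhi
--         if lo > 1:
--             memo[lo] = flo
--         memo[hi] = fhi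
--     return flo
--
-- def _val(v, nlo, flo, fhi):
--     if v <= 1:
--         return 0
--     odd = (v + 1) // 2
--     even = v // 2
--     go = flo if odd == nlo else fhi
--     ge = flo if even == nlo else fhi
--     return (even + 2 * odd - 2 + go + ge) % MOD
-- ===== Notes on version B (the rewrite author's own statement) =====
-- stated objective: alternative
-- what changed: Replaces the memoized top-down recursion by a bottom-up iteration over the O(log X) chain of halved values, keeping only a pair of accumulators for the two adjacent values needed at each depth (no recursion, no dict lookup on the hot path; the global memo is still populated).
import Mathlib
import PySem

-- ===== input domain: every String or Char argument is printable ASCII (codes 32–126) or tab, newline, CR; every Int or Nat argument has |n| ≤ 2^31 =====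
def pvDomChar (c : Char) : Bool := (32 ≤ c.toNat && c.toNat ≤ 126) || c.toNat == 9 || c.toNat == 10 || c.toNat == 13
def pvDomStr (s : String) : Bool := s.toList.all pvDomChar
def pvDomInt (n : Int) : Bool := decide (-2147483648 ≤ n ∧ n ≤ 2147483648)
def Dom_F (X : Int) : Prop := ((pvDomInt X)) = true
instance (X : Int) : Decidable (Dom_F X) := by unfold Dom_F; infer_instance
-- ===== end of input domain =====

-- B changes the decomposition (bottom-up pair iteration instead of memoized recursion);
-- the equivalence proved is about the RETURN value only: both Pythons also populate the
-- module-global `memo` dict as an observable side effect (B mirrors it), not modelled here.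

-- ===== PORT A =====
-- The global `memo` dict only caches values the plain recursion recomputes identically,
-- so the port is the memo-free recursion; each cached value equals the recursive value.
def F (X : Int) : Int :=
  if _h : X ≤ 1 then 0
  else
    let odd := PySem.Int.floordiv (X + 1) 2
    let even := PySem.Int.floordiv X 2
    PySem.Int.mod (even + 2 * odd - 2 + F odd + F even) 1000000007
termination_by X.toNat
decreasing_by
  · have h2 : (0:Int) < 2 := by omega
    simp only [PySem.Int.floordiv_eq_ediv_of_pos h2]; omega
  · have h2 : (0:Int) < 2 := by omega
    simp only [PySem.Int.floordiv_eq_ediv_of_pos h2]; omega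

-- ===== PORT B =====
-- value of one node given the two accumulators (flo, fhi) of the next (halved) level
def pvVal (v nlo flo fhi : Int) : Int :=
  if v ≤ 1 then 0
  else
    let odd := PySem.Int.floordiv (v + 1) 2
    let even := PySem.Int.floordiv v 2
    let go := if odd == nlo then flo else fhi
    let ge := if even == nlo then flo else fhi
    PySem.Int.mod (even + 2 * odd - 2 + go + ge) 1000000007

-- the `while hi > 1` collection loop of Source B
def pvLevels (lo hi : Int) : List (Int × Int) :=
  if _h : hi ≤ 1 then []
  else (lo, hi) :: pvLevels (PySem.Int.floordiv lo 2) (PySem.Int.floordiv (hi + 1) 2)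
termination_by hi.toNat
decreasing_by
  have h2 : (0:Int) < 2 := by omega
  simp only [PySem.Int.floordiv_eq_ediv_of_pos h2]; omega

-- body of the `for lo, hi in reversed(levels)` loop
def pvStep (s : Int × Int) (p : Int × Int) : Int × Int :=
  let nlo := PySem.Int.floordiv p.1 2
  let nflo := pvVal p.1 nlo s.1 s.2
  let nfhi := if p.2 == p.1 then nflo else pvVal p.2 nlo s.1 s.2
  (nflo, nfhi)

def F_alt (X : Int) : Int :=
  if X ≤ 1 then 0
  else ((pvLevels X X).reverse.foldl pvStep (0, 0)).1

-- ===== PRECONDITION & SPEC =====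
def Spec_F (X : Int) (out : Int) : Prop := out = F_alt X
instance (X : Int) (out : Int) : Decidable (Spec_F X out) := by unfold Spec_F; infer_instance

-- ===== CLAIM (what is proved, stated in full; the proofs are below) =====
def Claim_equal_F : Prop := ∀ (X : Int), Dom_F X → Spec_F X (F X)

-- ===== LEMMAS AND PROOFS =====

theorem pv_fd (a : Int) : PySem.Int.floordiv a 2 = a / 2 :=
  PySem.Int.floordiv_eq_ediv_of_pos (by omega)

theorem F_le_one {X : Int} (h : X ≤ 1) : F X = 0 := by
  rw [F]; simp [h]

-- one node: pvVal fed with the accumulators of the halved level computes F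
theorem pvVal_eq (v lo hi : Int) (h0 : 0 ≤ lo) (hlv : lo ≤ v) (hvh : v ≤ hi)
    (hh : hi ≤ lo + 1) :
    pvVal v (lo / 2) (F (lo / 2)) (F ((hi + 1) / 2)) = F v := by
  by_cases hv : v ≤ 1
  · rw [pvVal, if_pos hv, F_le_one hv]
  · rw [pvVal, if_neg hv]
    conv_rhs => rw [F]
    rw [dif_neg hv]
    simp only [pv_fd, beq_iff_eq]
    have hgo : (if (v + 1) / 2 = lo / 2 then F (lo / 2) else F ((hi + 1) / 2))
        = F ((v + 1) / 2) := by
      by_cases hc : (v + 1) / 2 = lo / 2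
      · rw [if_pos hc, hc]
      · rw [if_neg hc]; congr 1; omega
    have hge : (if v / 2 = lo / 2 then F (lo / 2) else F ((hi + 1) / 2))
        = F (v / 2) := by
      by_cases hc : v / 2 = lo / 2
      · rw [if_pos hc, hc]
      · rw [if_neg hc]; congr 1; omega
    rw [hgo, hge]

-- loop invariant: folding over the reversed level list computes (F lo, F hi)
theorem pvFold_eq (lo hi : Int) (h0 : 0 ≤ lo) (h1 : lo ≤ hi) (h2 : hi ≤ lo + 1) :
    (pvLevels lo hi).reverse.foldl pvStep (0, 0) = (F lo, F hi) := by
  by_cases hb : hi ≤ 1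
  · rw [pvLevels, dif_pos hb]
    simp [F_le_one hb, F_le_one (le_trans h1 hb)]
  · rw [pvLevels, dif_neg hb]
    simp only [List.reverse_cons, List.foldl_append, List.foldl_cons, List.foldl_nil, pv_fd]
    rw [pvFold_eq (lo / 2) ((hi + 1) / 2) (by omega) (by omega) (by omega)]
    rw [pvStep]
    simp only [pv_fd, beq_iff_eq]
    have hvlo := pvVal_eq lo lo hi h0 le_rfl h1 h2
    have hvhi := pvVal_eq hi lo hi h0 h1 le_rfl h2
    by_cases heq : hi = lo
    · rw [if_pos heq, hvlo, heq]
    · rw [if_neg heq, hvlo, hvhi]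
termination_by hi.toNat
decreasing_by omega

-- ===== VERDICT (by name: the statement is the Claim_ definition above) =====
theorem F_spec : Claim_equal_F := by
  intro X _
  unfold Spec_F F_alt
  by_cases h : X ≤ 1
  · simp [h, F_le_one h]
  · rw [if_neg h, pvFold_eq X X (by omega) le_rfl (by omega)]
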